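-- pv_equiv track=rewrite | github.com/yuanj1ng1723/Python.1 | dice_game(2).py | densify_closed_path
-- ===== SOURCE A (Python) =====
-- def densify_closed_path(points):
--     dense = []
--     index_map = {}
--     count = len(points)
--
--     for i in range(count):
--         sx, sy = points[i]
--         ex, ey = points[(i + 1) % count]
--         index_map[i] = len(dense)
--         dense.append((sx, sy))
--
--         dx = 0 if ex == sx else (1 if ex > sx else -1)
--         dy = 0 if ey == sy else (1 if ey > sy else -1)
--         x, y = sx, sy
--         while (x + dx, y + dy) != (ex, ey):
--             x += dx
--             y += dy
--             dense.append((x, y))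
--
--     return dense, index_map
-- ===== SOURCE B (Python) =====
-- def densify_closed_path(points):
--     count = len(points)
--     # closed-form segment generation: each segment contributes its start plus
--     # the intermediate unit steps (the endpoint belongs to the next segment)
--     segs = []
--     for i in range(count):
--         sx, sy = points[i]
--         ex, ey = points[(i + 1) % count]
--         dx = (ex > sx) - (ex < sx)
--         dy = (ey > sy) - (ey < sy)
--         n = max(abs(ex - sx), abs(ey - sy), 1)
--         segs.append([(sx + k * dx, sy + k * dy) for k in range(n)])
--     dense = [p for seg in segs for p in seg]
--     index_map = {}
--     total = 0
--     for i, seg in enumerate(segs):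
--         index_map[i] = total
--         total += len(seg)
--     return dense, index_map
-- ===== Notes on version B (the rewrite author's own statement) =====
-- stated objective: alternative
-- what changed: Replaces the sentinel-driven while loop per segment with a closed-form step count (max of coordinate distances) and a comprehension generating each segment's points, then builds dense by flattening the segments and index_map by a prefix-sum of segment lengths.
import Mathlib
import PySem

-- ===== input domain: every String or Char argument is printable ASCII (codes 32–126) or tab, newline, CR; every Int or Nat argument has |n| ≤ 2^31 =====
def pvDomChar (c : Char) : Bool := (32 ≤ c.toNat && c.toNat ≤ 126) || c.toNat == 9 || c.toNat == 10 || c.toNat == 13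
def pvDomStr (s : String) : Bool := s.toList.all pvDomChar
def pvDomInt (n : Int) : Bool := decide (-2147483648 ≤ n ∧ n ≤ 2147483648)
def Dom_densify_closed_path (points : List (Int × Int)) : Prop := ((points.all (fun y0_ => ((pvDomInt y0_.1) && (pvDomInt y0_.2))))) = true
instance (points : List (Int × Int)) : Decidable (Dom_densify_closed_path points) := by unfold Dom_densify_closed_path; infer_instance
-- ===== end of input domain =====

-- B replaces A's sentinel-driven while loop with a closed-form step count per segment
-- and assembles dense/index_map from the generated segments; the return values agree on
-- every input where A terminates (Pre_ excludes paths on which A's while loop never ends).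

-- ===== PORT A =====
-- the while loop of A, with fuel; under Pre_ the fuel (|Δx|+|Δy|+1) is never exhausted,
-- so this is exact on every admitted input
def pyWhileA (ex ey dx dy : Int) : Nat → Int → Int → List (Int × Int) → List (Int × Int)
  | 0, _, _, dense => dense
  | fuel+1, x, y, dense =>
    if (x + dx, y + dy) ≠ (ex, ey) then
      pyWhileA ex ey dx dy fuel (x + dx) (y + dy) (dense ++ [(x + dx, y + dy)])
    else dense

-- body of A's for-loop; indices i and (i+1) % count are always in range, so getD is exact
def stepA (points : List (Int × Int)) (count : Nat)
    (st : List (Int × Int) × PySem.Dict Int Int) (i : Nat) :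
    List (Int × Int) × PySem.Dict Int Int :=
  let s := points.getD i (0, 0)
  let e := points.getD ((i + 1) % count) (0, 0)
  let im := st.2.insert (i : Int) (st.1.length : Int)
  let dense := st.1 ++ [s]
  let dx : Int := if e.1 = s.1 then 0 else if e.1 > s.1 then 1 else -1
  let dy : Int := if e.2 = s.2 then 0 else if e.2 > s.2 then 1 else -1
  (pyWhileA e.1 e.2 dx dy ((e.1 - s.1).natAbs + (e.2 - s.2).natAbs + 1) s.1 s.2 dense, im)

def densify_closed_path (points : List (Int × Int)) : (List (Int × Int)) × (List (Int × Int)) :=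
  let count := points.length
  let st := (List.range count).foldl (stepA points count) ([], PySem.Dict.empty)
  (st.1, st.2.items)

-- ===== PORT B =====
def segB (points : List (Int × Int)) (count : Nat) (i : Nat) : List (Int × Int) :=
  let s := points.getD i (0, 0)
  let e := points.getD ((i + 1) % count) (0, 0)
  let dx : Int := (if e.1 > s.1 then 1 else 0) - (if e.1 < s.1 then 1 else 0)
  let dy : Int := (if e.2 > s.2 then 1 else 0) - (if e.2 < s.2 then 1 else 0)
  let n : Nat := max (max (e.1 - s.1).natAbs (e.2 - s.2).natAbs) 1
  (List.range n).map (fun (k : Nat) => (s.1 + (k : Int) * dx, s.2 + (k : Int) * dy))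

-- body of B's index_map loop (state: running total, dict)
def stepB (st : Int × PySem.Dict Int Int) (p : Int × List (Int × Int)) :
    Int × PySem.Dict Int Int :=
  (st.1 + (p.2.length : Int), st.2.insert p.1 st.1)

def densify_closed_path_alt (points : List (Int × Int)) : (List (Int × Int)) × (List (Int × Int)) :=
  let count := points.length
  let segs := (List.range count).map (segB points count)
  let dense := segs.flatMap id
  let st := (PySem.List.enumerate segs).foldl stepB (0, PySem.Dict.empty)
  (dense, st.2.items)

-- ===== PRECONDITION & SPEC =====
-- Pre_ excludes exactly the inputs on which some segment is neither axis-aligned nor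
-- exactly diagonal: there A's while loop never reaches its sentinel and A diverges.
def Pre_densify_closed_path (points : List (Int × Int)) : Prop :=
  ∀ i ∈ List.range points.length,
    (points.getD ((i + 1) % points.length) (0, 0)).1 = (points.getD i (0, 0)).1 ∨
    (points.getD ((i + 1) % points.length) (0, 0)).2 = (points.getD i (0, 0)).2 ∨
    ((points.getD ((i + 1) % points.length) (0, 0)).1 - (points.getD i (0, 0)).1).natAbs =
      ((points.getD ((i + 1) % points.length) (0, 0)).2 - (points.getD i (0, 0)).2).natAbs
instance (points : List (Int × Int)) : Decidable (Pre_densify_closed_path points) := by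
  unfold Pre_densify_closed_path; infer_instance
def pvWitness_densify_closed_path : (List (Int × Int)) := [(0, 0), (3, 0), (3, 2), (1, 0)]
def Spec_densify_closed_path (points : List (Int × Int)) (out : (List (Int × Int)) × (List (Int × Int))) : Prop := out = densify_closed_path_alt points
instance (points : List (Int × Int)) (out : (List (Int × Int)) × (List (Int × Int))) : Decidable (Spec_densify_closed_path points out) := by unfold Spec_densify_closed_path; infer_instance

-- ===== CLAIM (what is proved, stated in full; the proofs are below) =====
def Claim_equal_densify_closed_path : Prop := ∀ (points : List (Int × Int)), Dom_densify_closed_path points → Pre_densify_closed_path points → Spec_densify_closed_path points (densify_closed_path points)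

-- ===== LEMMAS AND PROOFS =====

theorem densify_witness_ok :
    Dom_densify_closed_path pvWitness_densify_closed_path ∧
    Pre_densify_closed_path pvWitness_densify_closed_path := by decide

-- dense after processing segments 0..n-1
def densePrefix (points : List (Int × Int)) (n : Nat) : List (Int × Int) :=
  ((List.range n).map (segB points points.length)).flatMap id

-- index_map items after processing segments 0..n-1
def pairsList (points : List (Int × Int)) (n : Nat) : List (Int × Int) :=
  (List.range n).map (fun (i : Nat) => ((i : Int), ((densePrefix points i).length : Int)))

-- closed form of A's while loop when the endpoint is exactly d unit steps away
theorem whileA_eq (dx dy : Int) : ∀ (d : Nat), (d = 0 ↔ dx = 0 ∧ dy = 0) →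
    ∀ (fuel : Nat), d ≤ fuel → ∀ (x y : Int) (dense : List (Int × Int)),
    pyWhileA (x + (d : Int) * dx) (y + (d : Int) * dy) dx dy fuel x y dense
      = dense ++ (List.range (d - 1)).map
          (fun (k : Nat) => (x + ((k : Int) + 1) * dx, y + ((k : Int) + 1) * dy)) := by
  intro d
  induction d with
  | zero =>
    intro hiff fuel _ x y dense
    obtain ⟨hdx, hdy⟩ := hiff.mp rfl
    subst hdx; subst hdy
    cases fuel with
    | zero => simp [pyWhileA]
    | succ f => simp [pyWhileA]
  | succ e ih =>
    intro hiff fuel hfuel x y dense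
    have hd0 : ¬ (dx = 0 ∧ dy = 0) := fun h => by have := hiff.mpr h; omega
    cases fuel with
    | zero => exact absurd hfuel (by omega)
    | succ f =>
      cases e with
      | zero =>
        simp only [pyWhileA]
        rw [if_neg]
        · simp
        · push_cast
          simp
      | succ e' =>
        have hcond : (x + dx, y + dy) ≠ (x + ((e' + 1 + 1 : Nat) : Int) * dx, y + ((e' + 1 + 1 : Nat) : Int) * dy) := by
          intro heq
          rw [Prod.mk.injEq] at heq
          obtain ⟨h1, h2⟩ := heq
          apply hd0
          constructor
          · have : dx * ((e' : Int) + 1) = 0 := by push_cast at h1; ring_nf at h1 ⊢; omega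
            rcases mul_eq_zero.mp this with h | h
            · exact h
            · exact absurd h (by positivity)
          · have : dy * ((e' : Int) + 1) = 0 := by push_cast at h2; ring_nf at h2 ⊢; omega
            rcases mul_eq_zero.mp this with h | h
            · exact h
            · exact absurd h (by positivity)
        simp only [pyWhileA]
        rw [if_pos hcond]
        have hex : x + ((e' + 1 + 1 : Nat) : Int) * dx = (x + dx) + ((e' + 1 : Nat) : Int) * dx := by
          push_cast; ring
        have hey : y + ((e' + 1 + 1 : Nat) : Int) * dy = (y + dy) + ((e' + 1 : Nat) : Int) * dy := by
          push_cast; ring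
        rw [hex, hey, ih (Iff.intro (fun h => absurd h (by omega)) (fun h => absurd h hd0)) f (by omega)]
        rw [List.append_assoc]
        congr 1
        have : (e' + 1 + 1 - 1 : Nat) = e' + 1 := by omega
        rw [this, List.range_succ_eq_map, List.map_cons, List.map_map]
        simp only [Nat.cast_zero, zero_add, one_mul, List.singleton_append, Nat.add_sub_cancel]
        congr 1
        apply List.map_congr_left
        intro k _
        simp only [Function.comp]
        rw [Prod.mk.injEq]
        constructor <;> push_cast <;> ring

-- B's direction formula equals A's
theorem dir_eq (a b : Int) :
    (if a = b then (0 : Int) else if a > b then 1 else -1)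
      = (if a > b then (1 : Int) else 0) - (if a < b then 1 else 0) := by
  rcases lt_trichotomy a b with h | h | h <;> simp [h] <;> omega

-- the start point followed by the while-loop's intermediates is B's closed-form segment
theorem seg_append (sx sy dx dy : Int) (d : Nat) :
    (sx, sy) :: (List.range (d - 1)).map
        (fun (k : Nat) => (sx + ((k : Int) + 1) * dx, sy + ((k : Int) + 1) * dy))
      = (List.range (max d 1)).map
        (fun (k : Nat) => (sx + (k : Int) * dx, sy + (k : Int) * dy)) := by
  cases d with
  | zero => simp
  | succ m =>
    have hmax : max (m + 1) 1 = m + 1 := by omega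
    rw [hmax, List.range_succ_eq_map, List.map_cons, List.map_map]
    simp only [Nat.cast_zero, zero_mul, add_zero, Nat.add_sub_cancel]
    congr 1

-- one segment of A (start append + while loop) equals B's segment, appended
theorem seg_core (sx sy ex ey : Int) (dense : List (Int × Int))
    (hcond : ex = sx ∨ ey = sy ∨ (ex - sx).natAbs = (ey - sy).natAbs) :
    pyWhileA ex ey (if ex = sx then 0 else if ex > sx then 1 else -1)
        (if ey = sy then 0 else if ey > sy then 1 else -1)
        ((ex - sx).natAbs + (ey - sy).natAbs + 1) sx sy (dense ++ [(sx, sy)])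
      = dense ++ (List.range (max (max (ex - sx).natAbs (ey - sy).natAbs) 1)).map
          (fun (k : Nat) => (sx + (k : Int) * ((if ex > sx then (1 : Int) else 0) - (if ex < sx then 1 else 0)),
            sy + (k : Int) * ((if ey > sy then (1 : Int) else 0) - (if ey < sy then 1 else 0)))) := by
  rw [← dir_eq ex sx, ← dir_eq ey sy]
  set dx : Int := if ex = sx then 0 else if ex > sx then 1 else -1 with hdx
  set dy : Int := if ey = sy then 0 else if ey > sy then 1 else -1 with hdy
  set d : Nat := max (ex - sx).natAbs (ey - sy).natAbs with hd
  have hx : ex = sx + ((ex - sx).natAbs : Int) * dx ∧ (dx = 0 ↔ ex = sx) := by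
    rw [hdx]
    rcases lt_trichotomy ex sx with h | h | h
    · rw [if_neg (show ¬ ex = sx by omega), if_neg (show ¬ ex > sx by omega), mul_neg_one]; omega
    · rw [if_pos h, mul_zero]; omega
    · rw [if_neg (show ¬ ex = sx by omega), if_pos (show ex > sx by omega), mul_one]; omega
  have hy : ey = sy + ((ey - sy).natAbs : Int) * dy ∧ (dy = 0 ↔ ey = sy) := by
    rw [hdy]
    rcases lt_trichotomy ey sy with h | h | h
    · rw [if_neg (show ¬ ey = sy by omega), if_neg (show ¬ ey > sy by omega), mul_neg_one]; omega
    · rw [if_pos h, mul_zero]; omega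
    · rw [if_neg (show ¬ ey = sy by omega), if_pos (show ey > sy by omega), mul_one]; omega
  have hdx0 : ex ≠ sx → d = (ex - sx).natAbs := by
    intro h
    rcases hcond with h' | h' | h'
    · exact absurd h' h
    · rw [hd]; omega
    · rw [hd]; omega
  have hdy0 : ey ≠ sy → d = (ey - sy).natAbs := by
    intro h
    rcases hcond with h' | h' | h'
    · rw [hd]; omega
    · exact absurd h' h
    · rw [hd]; omega
  have hex : ex = sx + (d : Int) * dx := by
    by_cases h : ex = sx
    · rw [h, hx.2.mpr h, mul_zero, add_zero]
    · rw [hdx0 h]; exact hx.1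
  have hey : ey = sy + (d : Int) * dy := by
    by_cases h : ey = sy
    · rw [h, hy.2.mpr h, mul_zero, add_zero]
    · rw [hdy0 h]; exact hy.1
  have hiff : d = 0 ↔ dx = 0 ∧ dy = 0 := by
    constructor
    · intro h
      have h1 : ex = sx := by rw [hd] at h; omega
      have h2 : ey = sy := by rw [hd] at h; omega
      exact ⟨hx.2.mpr h1, hy.2.mpr h2⟩
    · rintro ⟨h1, h2⟩
      have := hx.2.mp h1
      have := hy.2.mp h2
      rw [hd]; omega
  rw [hex, hey, whileA_eq dx dy d hiff _ (by omega), List.append_assoc]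
  congr 1
  simpa using seg_append sx sy dx dy d

-- one step of A produces exactly B's segment (and the matching index_map entry)
theorem stepA_eq (points : List (Int × Int)) (i : Nat)
    (hcond : (points.getD ((i + 1) % points.length) (0, 0)).1 = (points.getD i (0, 0)).1 ∨
      (points.getD ((i + 1) % points.length) (0, 0)).2 = (points.getD i (0, 0)).2 ∨
      ((points.getD ((i + 1) % points.length) (0, 0)).1 - (points.getD i (0, 0)).1).natAbs =
        ((points.getD ((i + 1) % points.length) (0, 0)).2 - (points.getD i (0, 0)).2).natAbs)
    (st : List (Int × Int) × PySem.Dict Int Int) :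
    stepA points points.length st i
      = (st.1 ++ segB points points.length i, st.2.insert (i : Int) (st.1.length : Int)) := by
  have := seg_core (points.getD i (0, 0)).1 (points.getD i (0, 0)).2
    (points.getD ((i + 1) % points.length) (0, 0)).1
    (points.getD ((i + 1) % points.length) (0, 0)).2 st.1 hcond
  simp only [Prod.mk.eta] at this
  simp only [stepA, segB, Prod.mk.injEq]
  exact ⟨this, trivial⟩

theorem densePrefix_succ (points : List (Int × Int)) (m : Nat) :
    densePrefix points (m + 1) = densePrefix points m ++ segB points points.length m := by
  simp [densePrefix, List.range_succ]

theorem pairsList_succ (points : List (Int × Int)) (m : Nat) :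
    pairsList points (m + 1)
      = pairsList points m ++ [((m : Int), ((densePrefix points m).length : Int))] := by
  simp [pairsList, List.range_succ]

-- inserting the next index (always fresh) appends the new index_map entry
theorem dict_step (points : List (Int × Int)) (m : Nat) :
    (PySem.Dict.mk (pairsList points m)).insert (m : Int) ((densePrefix points m).length : Int)
      = PySem.Dict.mk (pairsList points (m + 1)) := by
  apply PySem.Dict.ext
  rw [PySem.Dict.items_insert_of_not_contains]
  · rw [pairsList_succ]
  · rw [PySem.Dict.contains_eq_decide_mem_keys, PySem.Dict.keys_mk]
    simp only [decide_eq_false_iff_not, pairsList, List.map_map]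
    intro hmem
    obtain ⟨j, hj, hje⟩ := List.mem_map.mp hmem
    simp only [Function.comp_apply] at hje
    have : j = m := by exact_mod_cast hje
    exact absurd (List.mem_range.mp hj) (by omega)

-- A's fold over the first n segments, in closed form
theorem A_fold (points : List (Int × Int)) (hpre : Pre_densify_closed_path points) :
    ∀ n, n ≤ points.length →
    (List.range n).foldl (stepA points points.length) ([], PySem.Dict.empty)
      = (densePrefix points n, PySem.Dict.mk (pairsList points n)) := by
  intro n
  induction n with
  | zero => intro _; simp [densePrefix, pairsList]; rfl
  | succ m ih =>
    intro h
    rw [List.range_succ, List.foldl_append, ih (by omega)]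
    simp only [List.foldl_cons, List.foldl_nil]
    rw [stepA_eq points m (hpre m (List.mem_range.mpr (by omega)))]
    rw [← densePrefix_succ, dict_step]

-- B's index_map fold over the first n segments, in closed form
theorem B_fold (points : List (Int × Int)) :
    ∀ n,
    (PySem.List.enumerate ((List.range n).map (segB points points.length))).foldl stepB
        (0, PySem.Dict.empty)
      = (((densePrefix points n).length : Int), PySem.Dict.mk (pairsList points n)) := by
  intro n
  induction n with
  | zero => simp [densePrefix, pairsList]; rfl
  | succ m ih =>
    rw [List.range_succ, List.map_append, PySem.List.enumerate_append, List.foldl_append, ih]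
    simp only [List.map_cons, List.map_nil, List.length_map, List.length_range]
    simp only [PySem.List.enumerate, List.foldl_cons, List.foldl_nil, stepB, zero_add]
    rw [dict_step, densePrefix_succ]
    simp

theorem densify_closed_path_spec : Claim_equal_densify_closed_path := by
  intro points _ hpre
  show densify_closed_path points = densify_closed_path_alt points
  change (((List.range points.length).foldl (stepA points points.length)
        ([], PySem.Dict.empty)).1,
      ((List.range points.length).foldl (stepA points points.length)
        ([], PySem.Dict.empty)).2.items)
    = ((((List.range points.length).map (segB points points.length)).flatMap id),
      ((PySem.List.enumerate ((List.range points.length).map (segB points points.length))).foldl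
        stepB (0, PySem.Dict.empty)).2.items)
  rw [A_fold points hpre points.length le_rfl, B_fold points points.length]
  rfl
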